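-- pv_equiv track=rewrite | github.com/d1mo22/DGSI | manufacturer/dashboard/components/orders_panel.py | _counts_html
-- ===== SOURCE A (Python) =====
-- def _counts_html(all_orders: list) -> str:
--     pending = sum(1 for o in all_orders if o["status"] == "pending")
--     released = sum(1 for o in all_orders if o["status"] == "released")
--     waiting = sum(1 for o in all_orders if o["status"] == "waiting_materials")
--     completed = sum(1 for o in all_orders if o["status"] == "completed")
--     chips = [
--         (pending, "#F59E0B", "PENDING"),
--         (released, "#3B82F6", "RELEASED"),
--         (waiting, "#EF4444", "WAITING"),
--         (completed, "#22C55E", "DONE"),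
--     ]
--     inner = "".join(
--         f'<div class="order-count-chip">'
--         f'<span class="count-number" style="color:{color}">{n}</span>'
--         f'<span class="count-label">{label}</span>'
--         f'</div>'
--         for n, color, label in chips
--     )
--     return f'<div class="order-counts">{inner}</div>'
-- ===== SOURCE B (Python) =====
-- def _counts_html(all_orders: list) -> str:
--     # Single counting pass over the orders instead of four filtered scans;
--     # direct concatenation instead of a chips list + join.
--     counts = {}
--     for o in all_orders:
--         s = o["status"]
--         counts[s] = counts.get(s, 0) + 1
--
--     def chip(n, color, label):
--         return (
--             f'<div class="order-count-chip">'
--             f'<span class="count-number" style="color:{color}">{n}</span>'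
--             f'<span class="count-label">{label}</span>'
--             f'</div>'
--         )
--
--     inner = (
--         chip(counts.get("pending", 0), "#F59E0B", "PENDING")
--         + chip(counts.get("released", 0), "#3B82F6", "RELEASED")
--         + chip(counts.get("waiting_materials", 0), "#EF4444", "WAITING")
--         + chip(counts.get("completed", 0), "#22C55E", "DONE")
--     )
--     return f'<div class="order-counts">{inner}</div>'
-- ===== Notes on version B (the rewrite author's own statement) =====
-- stated objective: alternative
-- what changed: Four separate filtered scans over all_orders (one per status) are replaced by a single counting pass into a dict with constant-time lookups, and the chips-list + ''.join formatting is replaced by a chip helper concatenated directly.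
import Mathlib
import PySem

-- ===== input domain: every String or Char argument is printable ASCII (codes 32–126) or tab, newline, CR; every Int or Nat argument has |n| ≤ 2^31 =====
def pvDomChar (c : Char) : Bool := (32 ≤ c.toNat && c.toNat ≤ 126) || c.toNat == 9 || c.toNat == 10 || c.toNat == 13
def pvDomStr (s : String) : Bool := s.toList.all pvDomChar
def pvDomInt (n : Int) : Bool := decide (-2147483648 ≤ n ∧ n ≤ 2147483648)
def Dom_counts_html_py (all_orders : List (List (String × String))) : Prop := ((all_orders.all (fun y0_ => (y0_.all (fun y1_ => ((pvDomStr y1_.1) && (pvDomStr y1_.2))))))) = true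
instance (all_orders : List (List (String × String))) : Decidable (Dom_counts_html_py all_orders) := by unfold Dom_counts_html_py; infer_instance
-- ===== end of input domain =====

-- B replaces A's four filtered scans over the orders by one counting pass into a dict
-- (then constant-time lookups) and joins the chips by direct concatenation: objective 'alternative'.


-- ===== PORT A =====
-- o["status"] : first-match dict lookup; Python raises KeyError when absent — Pre_ below
-- excludes that, so the getD default "" is never read on admitted inputs.
def pvStatusA (o : List (String × String)) : String :=
  (PySem.Dict.mk o).getD "status" ""

-- f-string for one chip (plain concatenation of literal pieces, exact)
def pvChipA (n : Int) (color : String) (label : String) : String :=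
  "<div class=\"order-count-chip\"><span class=\"count-number\" style=\"color:" ++ color
    ++ "\">" ++ PySem.Int.toStr n ++ "</span><span class=\"count-label\">" ++ label
    ++ "</span></div>"

def counts_html_py (all_orders : List (List (String × String))) : String :=
  let pending : Int := all_orders.foldl (fun acc o => if pvStatusA o == "pending" then acc + 1 else acc) 0
  let released : Int := all_orders.foldl (fun acc o => if pvStatusA o == "released" then acc + 1 else acc) 0
  let waiting : Int := all_orders.foldl (fun acc o => if pvStatusA o == "waiting_materials" then acc + 1 else acc) 0
  let completed : Int := all_orders.foldl (fun acc o => if pvStatusA o == "completed" then acc + 1 else acc) 0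
  let chips : List (Int × String × String) :=
    [(pending, "#F59E0B", "PENDING"), (released, "#3B82F6", "RELEASED"),
     (waiting, "#EF4444", "WAITING"), (completed, "#22C55E", "DONE")]
  let inner := PySem.Str.join "" (chips.map (fun c => pvChipA c.1 c.2.1 c.2.2))
  "<div class=\"order-counts\">" ++ inner ++ "</div>"

-- ===== PORT B =====
-- Source B's o["status"] and its chip() helper produce the same subterms as A's, so the
-- helpers pvStatusA/pvChipA are reused verbatim (aliases, not shared algorithm).
def counts_html_py_alt (all_orders : List (List (String × String))) : String :=
  let counts : PySem.Dict String Int :=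
    all_orders.foldl (fun d o => d.insert (pvStatusA o) (d.getD (pvStatusA o) 0 + 1)) PySem.Dict.empty
  let inner :=
    pvChipA (counts.getD "pending" 0) "#F59E0B" "PENDING"
      ++ (pvChipA (counts.getD "released" 0) "#3B82F6" "RELEASED"
      ++ (pvChipA (counts.getD "waiting_materials" 0) "#EF4444" "WAITING"
      ++ pvChipA (counts.getD "completed" 0) "#22C55E" "DONE"))
  "<div class=\"order-counts\">" ++ inner ++ "</div>"

-- ===== PRECONDITION & SPEC =====
-- Pre_ excludes exactly the inputs where some order has no "status" key: there Python A
-- (and B alike) raises KeyError instead of returning a string.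
def Pre_counts_html_py (all_orders : List (List (String × String))) : Prop :=
  (all_orders.all (fun o => (PySem.Dict.mk o).contains "status")) = true
instance (all_orders : List (List (String × String))) : Decidable (Pre_counts_html_py all_orders) := by unfold Pre_counts_html_py; infer_instance

def pvWitness_counts_html_py : (List (List (String × String))) :=
  [[("status", "pending"), ("id", "7")], [("status", "done?")], [("status", "completed")]]

def Spec_counts_html_py (all_orders : List (List (String × String))) (out : String) : Prop := out = counts_html_py_alt all_orders
instance (all_orders : List (List (String × String))) (out : String) : Decidable (Spec_counts_html_py all_orders out) := by unfold Spec_counts_html_py; infer_instance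

-- ===== CLAIM (what is proved, stated in full; the proofs are below) =====
def Claim_equal_counts_html_py : Prop := ∀ (all_orders : List (List (String × String))), Dom_counts_html_py all_orders → Pre_counts_html_py all_orders → Spec_counts_html_py all_orders (counts_html_py all_orders)

-- ===== LEMMAS AND PROOFS =====

-- B's dict lookup after the counting pass = the count of that status among the orders.
theorem pv_getD_counts (all_orders : List (List (String × String))) (s : String) :
    (all_orders.foldl (fun d o => d.insert (pvStatusA o) (d.getD (pvStatusA o) 0 + 1))
      (PySem.Dict.empty : PySem.Dict String Int)).getD s 0
    = ((all_orders.map pvStatusA).count s : Int) := by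
  rw [← List.foldl_map (f := pvStatusA)
        (g := fun (d : PySem.Dict String Int) x => d.insert x (d.getD x 0 + 1))]
  rw [PySem.Dict.getD_foldl_insert_add_one]
  simp

-- A's filtered-scan sum = the same count.
theorem pv_scan_count (all_orders : List (List (String × String))) (s : String) :
    all_orders.foldl (fun acc o => if pvStatusA o == s then acc + 1 else acc) (0 : Int)
    = ((all_orders.map pvStatusA).count s : Int) := by
  rw [PySem.List.foldl_count_if (p := fun o => pvStatusA o == s)]
  simp [List.count, List.countP_map, Function.comp_def]

-- "".join of four chips is the plain concatenation B writes.
theorem pv_join4 (a b c d : String) :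
    PySem.Str.join "" [a, b, c, d] = a ++ (b ++ (c ++ d)) := by
  simp [PySem.Str.join, PySem.Chars.join_cons_cons, PySem.Chars.join_singleton]

-- ===== VERDICT (by name: the statement is the Claim_ definition above) =====
theorem counts_html_py_spec : Claim_equal_counts_html_py := by
  intro all_orders _ _
  show counts_html_py all_orders = counts_html_py_alt all_orders
  unfold counts_html_py counts_html_py_alt
  simp only [pv_scan_count]
  simp only [List.map_cons, List.map_nil, pv_join4, pv_getD_counts]
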